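-- pv_equiv track=rewrite | github.com/scottlinuxden/taskAnalysis | taskAnalysis.py | _is_csv_row_empty
-- ===== SOURCE A (Python) =====
-- def _is_csv_row_empty(row):
--     line = ''
--     for column in row:
--         line = '%s%s' % (line, column)
--
--     if line.strip() == '':
--         return True
--     else:
--         return False
-- ===== SOURCE B (Python) =====
-- def _is_csv_row_empty(row):
--     return all(str(column).strip() == '' for column in row)
-- ===== Notes on version B (the rewrite author's own statement) =====
-- stated objective: faster
-- what changed: B tests each column individually with short-circuiting all(...) instead of concatenating every column into one accumulated string and stripping it once at the end.
import Mathlib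
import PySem

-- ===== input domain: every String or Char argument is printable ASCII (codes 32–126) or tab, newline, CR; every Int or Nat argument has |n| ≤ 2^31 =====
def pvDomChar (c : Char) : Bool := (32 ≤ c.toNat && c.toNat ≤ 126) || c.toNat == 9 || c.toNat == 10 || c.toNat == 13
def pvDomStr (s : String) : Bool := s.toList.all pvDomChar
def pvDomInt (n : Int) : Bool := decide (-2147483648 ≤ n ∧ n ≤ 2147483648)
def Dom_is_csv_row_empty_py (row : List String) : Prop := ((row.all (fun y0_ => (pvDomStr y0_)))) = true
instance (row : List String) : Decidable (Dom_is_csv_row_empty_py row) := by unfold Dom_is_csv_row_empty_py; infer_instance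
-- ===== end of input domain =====

-- ===== PORT A =====
-- A: accumulate all columns into one string, then test strip == ''.
def is_csv_row_empty_py (row : List String) : Bool :=
  let line := row.foldl (fun line column => line ++ column) ""
  if PySem.Str.strip line == "" then true else false

-- ===== PORT B =====
-- B (simpler): test each column individually, short-circuiting.
def is_csv_row_empty_py_alt (row : List String) : Bool :=
  row.all (fun column => PySem.Str.strip column == "")

-- ===== PRECONDITION & SPEC =====
def Spec_is_csv_row_empty_py (row : List String) (out : Bool) : Prop := out = is_csv_row_empty_py_alt row
instance (row : List String) (out : Bool) : Decidable (Spec_is_csv_row_empty_py row out) := by unfold Spec_is_csv_row_empty_py; infer_instance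

-- ===== CLAIM (what is proved, stated in full; the proofs are below) =====
def Claim_equal_is_csv_row_empty_py : Prop := ∀ (row : List String), Dom_is_csv_row_empty_py row → Spec_is_csv_row_empty_py row (is_csv_row_empty_py row)

-- ===== LEMMAS AND PROOFS =====

-- ===== VERDICT (by name: the statement is the Claim_ definition above) =====
-- strip cs = [] ↔ every char is whitespace
lemma strip_eq_nil_iff (cs : List Char) :
    PySem.Chars.strip cs = [] ↔ ∀ c ∈ cs, PySem.Chars.isspace c = true := by
  unfold PySem.Chars.strip PySem.Chars.rstrip PySem.Chars.lstrip
  rw [List.reverse_eq_nil_iff, List.dropWhile_eq_nil_iff]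
  constructor
  · intro h c hc
    rw [← List.takeWhile_append_dropWhile (p := PySem.Chars.isspace) (l := cs)] at hc
    rcases List.mem_append.mp hc with h1 | h2
    · exact List.mem_takeWhile_imp h1
    · exact h _ (List.mem_reverse.mpr h2)
  · intro h c hc
    exact h _ ((List.dropWhile_sublist _).subset (List.mem_reverse.mp hc))

lemma strip_beq_empty (s : String) :
    (PySem.Str.strip s == "") = true ↔ ∀ c ∈ s.toList, PySem.Chars.isspace c = true := by
  rw [beq_iff_eq, ← strip_eq_nil_iff, ← PySem.Str.toList_strip]
  constructor
  · intro h; rw [h]; rfl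
  · intro h
    show String.ofList (PySem.Chars.strip s.toList) = ""
    simp only [PySem.Str.toList_strip] at h
    rw [h]

lemma foldl_append_toList (row : List String) (acc : String) :
    (row.foldl (fun line column => line ++ column) acc).toList
      = acc.toList ++ (row.map String.toList).flatten := by
  induction row generalizing acc with
  | nil => simp
  | cons x xs ih => simp [List.foldl_cons, ih]

theorem is_csv_row_empty_py_spec : Claim_equal_is_csv_row_empty_py := by
  intro row _
  unfold Spec_is_csv_row_empty_py is_csv_row_empty_py is_csv_row_empty_py_alt
  have hA : (PySem.Str.strip (row.foldl (fun line column => line ++ column) "") == "") = true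
      ↔ ∀ s ∈ row, ∀ c ∈ s.toList, PySem.Chars.isspace c = true := by
    rw [strip_beq_empty, foldl_append_toList]
    simp [List.mem_flatten]
    tauto
  have hB : (row.all (fun column => PySem.Str.strip column == "")) = true
      ↔ ∀ s ∈ row, ∀ c ∈ s.toList, PySem.Chars.isspace c = true := by
    simp only [List.all_eq_true, strip_beq_empty]
  by_cases h : ∀ s ∈ row, ∀ c ∈ s.toList, PySem.Chars.isspace c = true
  · simp only [hA.mpr h, hB.mpr h, if_pos]
  · have a1 : ¬ ((PySem.Str.strip (row.foldl (fun line column => line ++ column) "") == "") = true) := fun hh => h (hA.mp hh)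
    have b1 : ¬ ((row.all (fun column => PySem.Str.strip column == "")) = true) := fun hh => h (hB.mp hh)
    simp only [Bool.not_eq_true] at a1 b1
    simp [a1, b1]
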